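-- pv_equiv track=rewrite | github.com/StevenXoFk/Tarea-taller-Tkinter | convertidor.py | base5_a_base13
-- ===== SOURCE A (Python) =====
-- def base5_a_base13(numero):
--     res = 0
--     exponentee = 0
--     base13 = ""
--
--
--     diles = "0123456789ABCDEF"
--
--     while numero > 0:
--         nuevo = numero % 10
--         res += nuevo * (5 ** exponentee)
--         numero //= 10
--         exponentee += 1
--
--     while res > 0:
--         todo = res % 13
--         base13 = diles[todo] + base13
--         res //= 13
--
--     return base13
-- ===== SOURCE B (Python) =====
-- def base5_a_base13(numero):
--     # Collect the decimal digits (least significant first), then evaluate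
--     # the base-5 value with Horner's method, then emit base-13 recursively.
--     digits = []
--     while numero > 0:
--         digits.append(numero % 10)
--         numero //= 10
--
--     res = 0
--     for d in reversed(digits):
--         res = res * 5 + d
--
--     diles = "0123456789ABCDEF"
--
--     def conv(r):
--         if r <= 0:
--             return ""
--         return conv(r // 13) + diles[r % 13]
--
--     return conv(res)
-- ===== Notes on version B (the rewrite author's own statement) =====
-- stated objective: alternative
-- what changed: B first materialises the decimal digits as a list, evaluates the base-5 value with Horner's method (no exponent variable, no 5**e powers), and builds the base-13 string by recursion appending digits at the end instead of an accumulator loop prepending at the front.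
import Mathlib
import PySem

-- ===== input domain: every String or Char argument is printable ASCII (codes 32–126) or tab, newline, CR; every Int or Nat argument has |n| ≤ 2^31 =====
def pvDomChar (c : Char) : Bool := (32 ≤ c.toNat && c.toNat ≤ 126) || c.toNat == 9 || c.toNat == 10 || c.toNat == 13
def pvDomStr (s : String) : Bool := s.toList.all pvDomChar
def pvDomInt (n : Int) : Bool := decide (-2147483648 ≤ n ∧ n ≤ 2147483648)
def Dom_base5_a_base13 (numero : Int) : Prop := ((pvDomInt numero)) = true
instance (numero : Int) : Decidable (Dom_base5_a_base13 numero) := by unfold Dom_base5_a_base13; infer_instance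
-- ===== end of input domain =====

-- B restructures A: decimal digits are collected into a list, the base-5 value is
-- computed by Horner's rule (no exponent variable, no repeated powers of 5), and the
-- base-13 string is built by recursion appending at the end instead of prepending
-- into an accumulator (objective: alternative decomposition, same cost class).

-- shared digit table "0123456789ABCDEF"
def pvDiles : List Char :=
  ['0', '1', '2', '3', '4', '5', '6', '7', '8', '9', 'A', 'B', 'C', 'D', 'E', 'F']

-- ===== PORT A =====
-- first while loop of A: res += (numero % 10) * 5 ** exponentee; numero //= 10
def pvLoopA1 (numero res : Int) (exponentee : Nat) : Int :=
  if numero > 0 then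
    pvLoopA1 (PySem.Int.floordiv numero 10)
      (res + PySem.Int.mod numero 10 * 5 ^ exponentee) (exponentee + 1)
  else res
termination_by numero.toNat
decreasing_by
  rename_i h
  rw [PySem.Int.floordiv_eq_ediv_of_pos (by norm_num)]
  omega

-- second while loop of A: base13 = diles[todo] + base13; res //= 13
-- diles[todo] is ported with pyGetD: todo = res % 13 is always in range of the 16-char table
def pvLoopA2 (res : Int) (base13 : List Char) : List Char :=
  if res > 0 then
    pvLoopA2 (PySem.Int.floordiv res 13)
      (PySem.List.pyGetD pvDiles (PySem.Int.mod res 13) '0' :: base13)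
  else base13
termination_by res.toNat
decreasing_by
  rename_i h
  rw [PySem.Int.floordiv_eq_ediv_of_pos (by norm_num)]
  omega

def base5_a_base13 (numero : Int) : String :=
  String.ofList (pvLoopA2 (pvLoopA1 numero 0 0) [])

-- ===== PORT B =====
-- B's first loop: digits.append(numero % 10); numero //= 10
def pvDigitsB (numero : Int) (digits : List Int) : List Int :=
  if numero > 0 then
    pvDigitsB (PySem.Int.floordiv numero 10) (digits ++ [PySem.Int.mod numero 10])
  else digits
termination_by numero.toNat
decreasing_by
  rename_i h
  rw [PySem.Int.floordiv_eq_ediv_of_pos (by norm_num)]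
  omega

-- B's recursive conv: "" if r <= 0 else conv(r // 13) + diles[r % 13]
def pvConvB (r : Int) : List Char :=
  if r ≤ 0 then []
  else pvConvB (PySem.Int.floordiv r 13) ++ [PySem.List.pyGetD pvDiles (PySem.Int.mod r 13) '0']
termination_by r.toNat
decreasing_by
  rename_i h
  rw [PySem.Int.floordiv_eq_ediv_of_pos (by norm_num)]
  omega

def base5_a_base13_alt (numero : Int) : String :=
  let digits := pvDigitsB numero []
  let res := digits.reverse.foldl (fun a d => a * 5 + d) 0
  String.ofList (pvConvB res)

-- ===== PRECONDITION & SPEC =====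
def Spec_base5_a_base13 (numero : Int) (out : String) : Prop := out = base5_a_base13_alt numero
instance (numero : Int) (out : String) : Decidable (Spec_base5_a_base13 numero out) := by unfold Spec_base5_a_base13; infer_instance

-- ===== CLAIM (what is proved, stated in full; the proofs are below) =====
def Claim_equal_base5_a_base13 : Prop := ∀ (numero : Int), Dom_base5_a_base13 numero → Spec_base5_a_base13 numero (base5_a_base13 numero)

-- ===== LEMMAS AND PROOFS =====

-- B's Horner value of the digit list of n
def pvVal (n : Int) : Int :=
  (pvDigitsB n []).reverse.foldl (fun a d => a * 5 + d) 0

theorem pvDigitsB_acc (n : Int) (acc : List Int) :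
    pvDigitsB n acc = acc ++ pvDigitsB n [] := by
  rw [pvDigitsB]
  conv_rhs => rw [pvDigitsB]
  split
  · next h =>
    rw [pvDigitsB_acc _ (acc ++ _), pvDigitsB_acc _ ([] ++ _)]
    simp
  · simp
termination_by n.toNat
decreasing_by
  all_goals rename_i h
  all_goals rw [PySem.Int.floordiv_eq_ediv_of_pos (by norm_num)]
  all_goals omega

theorem pvVal_nonpos {n : Int} (h : ¬ n > 0) : pvVal n = 0 := by
  unfold pvVal
  rw [pvDigitsB]
  simp [h]

theorem pvVal_pos {n : Int} (h : n > 0) :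
    pvVal n = 5 * pvVal (PySem.Int.floordiv n 10) + PySem.Int.mod n 10 := by
  unfold pvVal
  conv_lhs => rw [pvDigitsB]
  rw [if_pos h, pvDigitsB_acc]
  simp [List.foldl_append]
  ring

theorem pvLoopA1_eq (n res : Int) (e : Nat) :
    pvLoopA1 n res e = res + pvVal n * 5 ^ e := by
  rw [pvLoopA1]
  split
  · next h =>
    rw [pvLoopA1_eq, pvVal_pos h]
    ring
  · next h =>
    rw [pvVal_nonpos h]
    ring
termination_by n.toNat
decreasing_by
  rename_i h
  rw [PySem.Int.floordiv_eq_ediv_of_pos (by norm_num)]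
  omega

theorem pvLoopA2_eq (r : Int) (acc : List Char) :
    pvLoopA2 r acc = pvConvB r ++ acc := by
  rw [pvLoopA2, pvConvB]
  split
  · next h =>
    rw [pvLoopA2_eq, if_neg (by omega)]
    simp
  · next h =>
    rw [if_pos (by omega)]
    simp
termination_by r.toNat
decreasing_by
  rename_i h
  rw [PySem.Int.floordiv_eq_ediv_of_pos (by norm_num)]
  omega

-- ===== VERDICT (by name: the statement is the Claim_ definition above) =====
theorem base5_a_base13_spec : Claim_equal_base5_a_base13 := by
  intro numero _
  unfold Spec_base5_a_base13 base5_a_base13 base5_a_base13_alt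
  rw [pvLoopA1_eq, pvLoopA2_eq]
  simp [pvVal]
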